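-- pv_equiv track=rewrite | github.com/edmundmiller/dotfiles | packages/hermes-vcc/vendor/VCC.py | split_chains
-- ===== SOURCE A (Python) =====
-- _DISCARD_T = {"queue-operation", "file-history-snapshot", "last-prompt", "progress"}
--
-- _DISCARD_S = {"stop_hook_summary", "api_error", "bridge_status", "informational", "local_command"}
--
-- def _discard(r):
--     t = r.get("type")
--     return t in _DISCARD_T or (t == "system" and r.get("subtype") in _DISCARD_S)
--
-- def split_chains(recs):
--     kept = [r for r in recs if not _discard(r)]
--     chains, cur = [], []
--     for r in kept:
--         if r.get("type") == "system" and r.get("subtype") == "compact_boundary":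
--             if cur: chains.append(cur)
--             cur = []
--         else:
--             cur.append(r)
--     if cur: chains.append(cur)
--     return chains
-- ===== SOURCE B (Python) =====
-- _DISCARD_T = {"queue-operation", "file-history-snapshot", "last-prompt", "progress"}
--
-- _DISCARD_S = {"stop_hook_summary", "api_error", "bridge_status", "informational", "local_command"}
--
-- def _keep(r):
--     t = r.get("type")
--     return t not in _DISCARD_T and not (t == "system" and r.get("subtype") in _DISCARD_S)
--
-- def _boundary(r):
--     return r.get("type") == "system" and r.get("subtype") == "compact_boundary"
--
-- def split_chains(recs):
--     kept = [r for r in recs if _keep(r)]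
--     chains = []
--     i, n = 0, len(kept)
--     while i < n:
--         if _boundary(kept[i]):
--             i += 1
--             continue
--         j = i
--         while j < n and not _boundary(kept[j]):
--             j += 1
--         chains.append(kept[i:j])
--         i = j
--     return chains
-- ===== Notes on version B (the rewrite author's own statement) =====
-- stated objective: alternative
-- what changed: Replaces the running-accumulator loop (chains/cur state with a final flush) by a two-stage 'skip separators, then carve the maximal boundary-free slice' index scan that appends each whole segment at once and needs no pending-chain state.
import Mathlib
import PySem

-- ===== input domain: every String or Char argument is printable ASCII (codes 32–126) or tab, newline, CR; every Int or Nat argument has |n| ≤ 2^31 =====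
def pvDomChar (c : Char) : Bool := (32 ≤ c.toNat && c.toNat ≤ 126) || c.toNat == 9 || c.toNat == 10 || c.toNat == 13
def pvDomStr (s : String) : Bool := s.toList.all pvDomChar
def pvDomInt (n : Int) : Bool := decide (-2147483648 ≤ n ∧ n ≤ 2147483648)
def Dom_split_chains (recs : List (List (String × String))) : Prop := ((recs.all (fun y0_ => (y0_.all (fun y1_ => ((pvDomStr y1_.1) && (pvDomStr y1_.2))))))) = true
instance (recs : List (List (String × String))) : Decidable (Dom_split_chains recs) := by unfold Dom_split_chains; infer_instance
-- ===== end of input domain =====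

-- B restructures A's running-accumulator loop into a 'skip separators, carve the maximal
-- boundary-free slice' two-stage scan (alternative decomposition, same cost).

-- ===== PORT A =====
-- r.get(k): first-match lookup in the association list (Python dict lookup)
def pvGet (r : List (String × String)) (k : String) : Option String :=
  (r.find? (fun p => p.1 == k)).map (·.2)

def pvDiscard (r : List (String × String)) : Bool :=
  let t := pvGet r "type"
  (t == some "queue-operation" || t == some "file-history-snapshot" ||
   t == some "last-prompt" || t == some "progress") ||
  (t == some "system" &&
    (pvGet r "subtype" == some "stop_hook_summary" || pvGet r "subtype" == some "api_error" ||
     pvGet r "subtype" == some "bridge_status" || pvGet r "subtype" == some "informational" ||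
     pvGet r "subtype" == some "local_command"))

def split_chains (recs : List (List (String × String))) : List (List (List (String × String))) :=
  let kept := recs.filter (fun r => !pvDiscard r)
  let st := kept.foldl
    (fun (st : List (List (List (String × String))) × List (List (String × String))) r =>
      if pvGet r "type" == some "system" && pvGet r "subtype" == some "compact_boundary" then
        (if st.2 ≠ [] then st.1 ++ [st.2] else st.1, [])
      else
        (st.1, st.2 ++ [r]))
    ([], [])
  if st.2 ≠ [] then st.1 ++ [st.2] else st.1

-- ===== PORT B =====
def pvKeep (r : List (String × String)) : Bool :=
  let t := pvGet r "type"
  !(t == some "queue-operation" || t == some "file-history-snapshot" ||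
    t == some "last-prompt" || t == some "progress") &&
  !(t == some "system" &&
    (pvGet r "subtype" == some "stop_hook_summary" || pvGet r "subtype" == some "api_error" ||
     pvGet r "subtype" == some "bridge_status" || pvGet r "subtype" == some "informational" ||
     pvGet r "subtype" == some "local_command"))

def pvBoundary (r : List (String × String)) : Bool :=
  pvGet r "type" == some "system" && pvGet r "subtype" == some "compact_boundary"

-- the index scan: skip boundaries; otherwise the segment is the maximal boundary-free prefix
def pvCarve : List (List (String × String)) → List (List (List (String × String)))
  | [] => []
  | r :: rs =>
    if pvBoundary r then pvCarve rs
    else (r :: rs.takeWhile (fun x => !pvBoundary x)) ::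
         pvCarve (rs.dropWhile (fun x => !pvBoundary x))
termination_by l => l.length
decreasing_by
  · simp
  · exact Nat.lt_succ_of_le (List.length_dropWhile_le _ _)

def split_chains_alt (recs : List (List (String × String))) : List (List (List (String × String))) :=
  pvCarve (recs.filter pvKeep)

-- ===== PRECONDITION & SPEC =====
def Spec_split_chains (recs : List (List (String × String))) (out : List (List (List (String × String)))) : Prop := out = split_chains_alt recs
instance (recs : List (List (String × String))) (out : List (List (List (String × String)))) : Decidable (Spec_split_chains recs out) := by unfold Spec_split_chains; infer_instance

-- ===== CLAIM (what is proved, stated in full; the proofs are below) =====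
def Claim_equal_split_chains : Prop := ∀ (recs : List (List (String × String))), Dom_split_chains recs → Spec_split_chains recs (split_chains recs)

-- ===== LEMMAS AND PROOFS =====

lemma pvKeep_eq (r : List (String × String)) : pvKeep r = !pvDiscard r := by
  simp [pvKeep, pvDiscard]

-- A's loop without the chains accumulator: the pending chain cur is the only state
def pvPend (cur : List (List (String × String))) :
    List (List (String × String)) → List (List (List (String × String)))
  | [] => if cur ≠ [] then [cur] else []
  | r :: rs =>
    if pvBoundary r then (if cur ≠ [] then [cur] else []) ++ pvPend [] rs
    else pvPend (cur ++ [r]) rs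

lemma foldl_eq_pend (l : List (List (String × String)))
    (chains : List (List (List (String × String)))) (cur : List (List (String × String))) :
    (let st := l.foldl
      (fun (st : List (List (List (String × String))) × List (List (String × String))) r =>
        if pvGet r "type" == some "system" && pvGet r "subtype" == some "compact_boundary" then
          (if st.2 ≠ [] then st.1 ++ [st.2] else st.1, [])
        else
          (st.1, st.2 ++ [r]))
      (chains, cur)
     if st.2 ≠ [] then st.1 ++ [st.2] else st.1) = chains ++ pvPend cur l := by
  induction l generalizing chains cur with
  | nil => simp [pvPend]; split <;> simp
  | cons r rs ih =>
    simp only [List.foldl_cons]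
    by_cases hb : (pvGet r "type" == some "system" && pvGet r "subtype" == some "compact_boundary") = true
    · simp only [if_pos hb]
      rw [ih]
      rw [show pvPend cur (r :: rs) = (if cur ≠ [] then [cur] else []) ++ pvPend [] rs from by
        simp [pvPend, pvBoundary, hb]]
      split <;> simp
    · simp only [if_neg hb]
      rw [ih]
      rw [show pvPend cur (r :: rs) = pvPend (cur ++ [r]) rs from by
        simp [pvPend, pvBoundary, hb]]

lemma pend_eq_carve (l : List (List (String × String))) :
    (pvPend [] l = pvCarve l) ∧
    (∀ cur, cur ≠ [] → pvPend cur l =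
      (cur ++ l.takeWhile (fun x => !pvBoundary x)) ::
        pvCarve (l.dropWhile (fun x => !pvBoundary x))) := by
  induction l with
  | nil =>
    constructor
    · simp [pvPend, pvCarve]
    · intro cur h; simp [pvPend, pvCarve, h]
  | cons r rs ih =>
    by_cases hb : pvBoundary r
    · constructor
      · simp [pvPend, pvCarve, hb, ih.1]
      · intro cur h
        simp [pvPend, pvCarve, hb, h, ih.1]
    · constructor
      · rw [show pvPend [] (r :: rs) = pvPend [r] rs from by simp [pvPend, hb]]
        rw [ih.2 [r] (by simp)]
        simp [pvCarve, hb]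
      · intro cur h
        rw [show pvPend cur (r :: rs) = pvPend (cur ++ [r]) rs from by simp [pvPend, hb]]
        rw [ih.2 (cur ++ [r]) (by simp)]
        simp [hb]

-- ===== VERDICT (by name: the statement is the Claim_ definition above) =====
theorem split_chains_spec : Claim_equal_split_chains := by
  intro recs _
  show split_chains recs = split_chains_alt recs
  unfold split_chains split_chains_alt
  rw [show pvKeep = (fun r => !pvDiscard r) from funext pvKeep_eq]
  rw [foldl_eq_pend (recs.filter (fun r => !pvDiscard r)) [] []]
  simp [(pend_eq_carve _).1]
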